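-- pv_equiv track=rewrite | github.com/PolyJIT/benchbuild | benchbuild/projects/polybench/polybench.py | get_dump_arrays_output
-- ===== SOURCE A (Python) =====
-- def get_dump_arrays_output(data):
--     start_tag = "==BEGIN"
--     end_tag = "==END"
--
--     found_start = False
--     found_end = False
--
--     out = []
--     for line in data:
--         if start_tag in line:
--             found_start = True
--         if end_tag in line:
--             found_end = True
--         if found_start and not found_end:
--             out.append(line)
--
--     return out
-- ===== SOURCE B (Python) =====
-- def get_dump_arrays_output(data):
--     lines = list(data)
--     begin = next((i for i, line in enumerate(lines) if "==BEGIN" in line), None)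
--     end = next((i for i, line in enumerate(lines) if "==END" in line), None)
--     if begin is None:
--         return []
--     if end is None:
--         return lines[begin:]
--     if end <= begin:
--         return []
--     return lines[begin:end]
-- ===== Notes on version B (the rewrite author's own statement) =====
-- stated objective: simpler
-- what changed: Replaces the stateful found_start/found_end single-pass accumulator with two boundary-index searches (first line containing ==BEGIN / ==END) followed by a slice.
import Mathlib
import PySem

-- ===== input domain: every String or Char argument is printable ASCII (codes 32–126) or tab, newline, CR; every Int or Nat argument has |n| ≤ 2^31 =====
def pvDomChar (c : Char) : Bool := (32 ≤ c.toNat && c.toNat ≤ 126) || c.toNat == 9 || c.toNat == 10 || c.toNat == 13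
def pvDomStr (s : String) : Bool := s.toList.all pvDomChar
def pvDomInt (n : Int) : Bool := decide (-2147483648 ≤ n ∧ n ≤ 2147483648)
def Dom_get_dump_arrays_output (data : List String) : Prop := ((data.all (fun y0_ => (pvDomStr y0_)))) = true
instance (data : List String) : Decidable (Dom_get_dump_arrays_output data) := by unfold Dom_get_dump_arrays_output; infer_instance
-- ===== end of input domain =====

-- B replaces A's stateful found_start/found_end loop with two first-index searches plus a slice (simpler decomposition).
-- ===== PORT A =====
-- the for-loop of A: state (found_start, found_end), output accumulated in order
def getDumpLoopA (fs fe : Bool) (data : List String) : List String :=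
  match data with
  | [] => []
  | l :: ls =>
    let fs' := fs || PySem.Str.isIn "==BEGIN" l
    let fe' := fe || PySem.Str.isIn "==END" l
    (if fs' && !fe' then [l] else []) ++ getDumpLoopA fs' fe' ls

def get_dump_arrays_output (data : List String) : List String :=
  getDumpLoopA false false data

-- ===== PORT B =====
def get_dump_arrays_output_alt (data : List String) : List String :=
  match data.findIdx? (fun l => PySem.Str.isIn "==BEGIN" l) with
  | none => []
  | some b =>
    match data.findIdx? (fun l => PySem.Str.isIn "==END" l) with
    | none => PySem.List.slice data (some (b : Int)) none
    | some e => if e ≤ b then [] else PySem.List.slice data (some (b : Int)) (some (e : Int))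

-- ===== PRECONDITION & SPEC =====
def Spec_get_dump_arrays_output (data : List String) (out : List String) : Prop := out = get_dump_arrays_output_alt data
instance (data : List String) (out : List String) : Decidable (Spec_get_dump_arrays_output data out) := by unfold Spec_get_dump_arrays_output; infer_instance

-- ===== CLAIM (what is proved, stated in full; the proofs are below) =====
def Claim_equal_get_dump_arrays_output : Prop := ∀ (data : List String), Dom_get_dump_arrays_output data → Spec_get_dump_arrays_output data (get_dump_arrays_output data)

-- ===== LEMMAS AND PROOFS =====
-- proof-only generic versions of the two ports (predicates abstracted), to reason without unfolding isIn
def loopG (pB pE : String → Bool) (fs fe : Bool) (data : List String) : List String :=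
  match data with
  | [] => []
  | l :: ls =>
    let fs' := fs || pB l
    let fe' := fe || pE l
    (if fs' && !fe' then [l] else []) ++ loopG pB pE fs' fe' ls

def altG (pB pE : String → Bool) (data : List String) : List String :=
  match data.findIdx? pB with
  | none => []
  | some b =>
    match data.findIdx? pE with
    | none => PySem.List.slice data (some (b : Int)) none
    | some e => if e ≤ b then [] else PySem.List.slice data (some (b : Int)) (some (e : Int))

theorem loopA_eq_loopG (fs fe : Bool) (data : List String) :
    getDumpLoopA fs fe data =
      loopG (fun l => PySem.Str.isIn "==BEGIN" l) (fun l => PySem.Str.isIn "==END" l) fs fe data := by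
  induction data generalizing fs fe with
  | nil => rfl
  | cons l ls ih => simp only [getDumpLoopA, loopG, ih]

theorem alt_eq_altG (data : List String) :
    get_dump_arrays_output_alt data =
      altG (fun l => PySem.Str.isIn "==BEGIN" l) (fun l => PySem.Str.isIn "==END" l) data := rfl

-- once found_end is set, A appends nothing more
theorem loopG_fe_true (pB pE : String → Bool) (fs : Bool) (ls : List String) :
    loopG pB pE fs true ls = [] := by
  induction ls generalizing fs with
  | nil => rfl
  | cons l ls ih => simp [loopG, ih]

-- after BEGIN and before END, A takes lines while they lack the END tag
theorem loopG_started (pB pE : String → Bool) (ls : List String) :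
    loopG pB pE true false ls = ls.takeWhile (fun l => !pE l) := by
  induction ls with
  | nil => rfl
  | cons l ls ih =>
    by_cases h : pE l = true
    · simp [loopG, h, loopG_fe_true]
    · simp only [Bool.not_eq_true] at h
      simp [loopG, h, ih]

theorem takeWhile_not_of_findIdx?_none {α : Type} (p : α → Bool) (ls : List α)
    (h : ls.findIdx? p = none) : ls.takeWhile (fun l => !p l) = ls := by
  rw [List.takeWhile_eq_self_iff]
  intro x hx
  simpa using List.findIdx?_eq_none_iff.mp h x hx

theorem takeWhile_not_of_findIdx?_some {α : Type} (p : α → Bool) (ls : List α) (k : Nat)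
    (h : ls.findIdx? p = some k) : ls.takeWhile (fun l => !p l) = ls.take k := by
  induction ls generalizing k with
  | nil => simp at h
  | cons l ls ih =>
    rw [List.findIdx?_cons] at h
    by_cases hp : p l = true
    · simp [hp] at h
      simp [hp, ← h]
    · simp only [Bool.not_eq_true] at hp
      simp only [hp] at h
      simp at h
      obtain ⟨k', hk', rfl⟩ := h
      simp [hp, ih k' hk']

theorem main_eq_gen (pB pE : String → Bool) (data : List String) :
    loopG pB pE false false data = altG pB pE data := by
  induction data with
  | nil => rfl
  | cons l ls ih =>
    unfold altG
    by_cases hb : pB l = true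
    · by_cases he : pE l = true
      · simp [loopG, hb, he, loopG_fe_true, List.findIdx?_cons]
      · simp only [Bool.not_eq_true] at he
        simp only [loopG, hb, he, Bool.or_false, Bool.false_or, Bool.and_true,
          Bool.not_false, List.findIdx?_cons, if_pos]
        rw [loopG_started]
        cases hE : ls.findIdx? pE with
        | none =>
          simp [takeWhile_not_of_findIdx?_none _ _ hE]
        | some e =>
          simp only [Option.map_some, Bool.false_eq_true, if_false, List.singleton_append]
          rw [takeWhile_not_of_findIdx?_some _ _ _ hE,
            if_neg (by omega : ¬ e + 1 ≤ 0), PySem.List.slice_natCast]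
          simp [List.take_succ_cons]
    · simp only [Bool.not_eq_true] at hb
      by_cases he : pE l = true
      · simp only [loopG, hb, he, Bool.or_true, List.findIdx?_cons]
        rw [loopG_fe_true]
        cases hB : ls.findIdx? pB with
        | none => simp
        | some b => simp
      · simp only [Bool.not_eq_true] at he
        simp only [loopG, hb, he, Bool.or_false, Bool.false_and, List.nil_append,
          List.findIdx?_cons, Bool.false_eq_true, if_false]
        rw [ih]
        unfold altG
        cases hB : ls.findIdx? pB with
        | none => simp
        | some b =>
          cases hE : ls.findIdx? pE with
          | none =>
            simp only [Option.map_none, Option.map_some]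
            rw [PySem.List.slice_from_natCast, PySem.List.slice_from_natCast,
              List.drop_succ_cons]
          | some e =>
            simp only [Option.map_some, PySem.List.slice_natCast]
            by_cases hle : e ≤ b
            · simp [hle]
            · have : ¬ e + 1 ≤ b + 1 := by omega
              simp only [hle, this, if_false]
              rw [List.drop_succ_cons]
              congr 1
              omega

-- ===== VERDICT (by name: the statement is the Claim_ definition above) =====
theorem get_dump_arrays_output_spec : Claim_equal_get_dump_arrays_output := by
  intro data _
  unfold Spec_get_dump_arrays_output get_dump_arrays_output
  rw [loopA_eq_loopG, alt_eq_altG]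
  exact main_eq_gen _ _ data
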